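-- pv_equiv track=rewrite | github.com/kwokyto/wordle-solver | wordle_functions.py | valid_indices
-- ===== SOURCE A (Python) =====
-- def valid_indices(indices, length):
--     indices_list = set()
--     for string in indices.split():
--         if not string.isnumeric() and string != "-1":
--             return False
--         indices_list.add(int(string))
--
--     indices_list = list(indices_list)
--     if len(indices_list) <= 0:
--         return False
--
--     indices_list.sort()
--     if indices_list[-1] >= length:
--         return False
--     if indices_list[0] < -1:
--         return False
--     return True
-- ===== SOURCE B (Python) =====
-- def valid_indices(indices, length):
--     hi = None
--     for string in indices.split():
--         if not string.isnumeric() and string != "-1":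
--             return False
--         value = int(string)
--         if hi is None or value > hi:
--             hi = value
--     return hi is not None and hi < length
-- ===== Notes on version B (the rewrite author's own statement) =====
-- stated objective: simpler
-- what changed: Single validating pass tracking only the running maximum (every accepted token is a digit string or "-1", so the minimum is always >= -1 and no set, list conversion or sort is needed).
import Mathlib
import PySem

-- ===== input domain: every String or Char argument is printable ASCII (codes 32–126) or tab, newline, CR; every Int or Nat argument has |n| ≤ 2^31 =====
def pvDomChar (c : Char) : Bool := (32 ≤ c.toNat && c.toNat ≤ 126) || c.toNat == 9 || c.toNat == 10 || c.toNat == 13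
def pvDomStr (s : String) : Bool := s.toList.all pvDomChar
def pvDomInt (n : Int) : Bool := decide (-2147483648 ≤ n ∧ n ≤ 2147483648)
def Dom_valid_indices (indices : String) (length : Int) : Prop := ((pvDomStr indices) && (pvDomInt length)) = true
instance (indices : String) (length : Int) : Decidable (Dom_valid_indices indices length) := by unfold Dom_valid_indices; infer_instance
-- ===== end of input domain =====

-- B replaces A's collect-into-set / sort / inspect-both-ends with one validating pass that
-- tracks only the running maximum (every accepted token is a digit string or "-1", so the
-- minimum is always ≥ -1); objective: simpler.
-- Note on the ports: on the ASCII domain str.isnumeric() coincides with PySem.Str.strIsdigit,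
-- and int(string) always succeeds on guard-passing tokens, so `(PySem.Int.ofStr? t).getD 0`
-- is exact there (the default 0 is never used).

-- ===== PORT A =====
-- the for-loop over indices.split(), accumulating the set; the early `return False` makes the
-- recursion stop with false, and the [] case is the code after the loop
def validA_loop (length : Int) : List String → PySem.Set Int → Bool
  | [], s =>
      let indices_list : List Int := s          -- list(indices_list); order only consumed by sort
      if (indices_list.length : Int) ≤ 0 then false
      else
        let ls := PySem.List.sorted indices_list (fun x => x) false   -- indices_list.sort()
        if (PySem.List.pyGet? ls (-1)).getD 0 ≥ length then false     -- indices_list[-1] (list nonempty here)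
        else if (PySem.List.pyGet? ls 0).getD 0 < -1 then false       -- indices_list[0]
        else true
  | t :: rest, s =>
      if !(PySem.Str.strIsdigit t) && t != "-1" then false
      else validA_loop length rest (PySem.Set.add s ((PySem.Int.ofStr? t).getD 0))

def valid_indices (indices : String) (length : Int) : Bool :=
  validA_loop length (PySem.Str.split₀ indices) PySem.Set.empty

-- ===== PORT B =====
-- single pass: hi is the running maximum (None before the first token)
def validB_loop (length : Int) : List String → Option Int → Bool
  | [], hi =>
      match hi with                              -- return hi is not None and hi < length
      | none => false
      | some h => decide (h < length)
  | t :: rest, hi =>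
      if !(PySem.Str.strIsdigit t) && t != "-1" then false
      else
        let value := (PySem.Int.ofStr? t).getD 0
        validB_loop length rest
          (match hi with
           | none => some value
           | some h => if value > h then some value else some h)

def valid_indices_alt (indices : String) (length : Int) : Bool :=
  validB_loop length (PySem.Str.split₀ indices) none

-- ===== PRECONDITION & SPEC =====
def Spec_valid_indices (indices : String) (length : Int) (out : Bool) : Prop := out = valid_indices_alt indices length
instance (indices : String) (length : Int) (out : Bool) : Decidable (Spec_valid_indices indices length out) := by unfold Spec_valid_indices; infer_instance

-- ===== CLAIM (what is proved, stated in full; the proofs are below) =====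
def Claim_equal_valid_indices : Prop := ∀ (indices : String) (length : Int), Dom_valid_indices indices length → Spec_valid_indices indices length (valid_indices indices length)

-- ===== LEMMAS AND PROOFS =====

-- a digit character is not int()-whitespace
lemma isIntSpace_eq_false_of_isdigit (c : Char) (h : PySem.Chars.isdigit c = true) :
    PySem.Int.isIntSpace c = false := by
  revert h
  simp only [PySem.Chars.isdigit, PySem.Int.isIntSpace, Bool.and_eq_true, Bool.or_eq_false_iff,
    decide_eq_true_eq, decide_eq_false_iff_not]
  rintro ⟨h1, h2⟩
  refine ⟨⟨⟨⟨⟨?_, ?_⟩, ?_⟩, ?_⟩, ?_⟩, ?_⟩ <;> rintro rfl <;> revert h1 <;> decide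

lemma dropWhile_space_of_all_digits (l : List Char) (h : l.all PySem.Chars.isdigit = true) :
    l.dropWhile PySem.Int.isIntSpace = l := by
  cases l with
  | nil => rfl
  | cons c t =>
      simp only [List.all_cons, Bool.and_eq_true] at h
      rw [List.dropWhile_cons, isIntSpace_eq_false_of_isdigit c h.1]
      simp

lemma map_cast_getD_nonneg (o : Option Nat) :
    0 ≤ (Option.map (fun n : Int => n) (do let a ← o; pure ((a : Nat) : Int))).getD 0 := by
  cases o <;> simp

-- int() of an all-digit token is never negative (it parses through the sign-free branch)
lemma ofChars?_getD_nonneg_of_digits (cs : List Char) (h : PySem.Chars.strIsdigit cs = true) :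
    0 ≤ (PySem.Int.ofChars? cs).getD 0 := by
  simp only [PySem.Chars.strIsdigit, Bool.and_eq_true, Bool.not_eq_true', List.isEmpty_eq_false_iff] at h
  obtain ⟨hne, hall⟩ := h
  have hstrip : (List.dropWhile PySem.Int.isIntSpace
      (List.dropWhile PySem.Int.isIntSpace cs).reverse).reverse = cs := by
    rw [dropWhile_space_of_all_digits cs hall,
        dropWhile_space_of_all_digits cs.reverse (by simpa using hall), List.reverse_reverse]
  unfold PySem.Int.ofChars?
  rw [hstrip]
  cases cs with
  | nil => exact absurd rfl hne
  | cons c t =>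
      have hc : PySem.Chars.isdigit c = true := by
        simp only [List.all_cons, Bool.and_eq_true] at hall; exact hall.1
      have hcm : c ≠ '-' := by rintro rfl; revert hc; decide
      have hcp : c ≠ '+' := by rintro rfl; revert hc; decide
      dsimp only
      split
      · rename_i ds heq; exact absurd (List.cons.inj heq).1 hcm
      · rename_i ds heq; exact absurd (List.cons.inj heq).1 hcp
      · exact map_cast_getD_nonneg _

-- every token that passes A's guard parses to a value ≥ -1
lemma token_val_ge_neg_one (t : String)
    (hg : (!(PySem.Str.strIsdigit t) && t != "-1") = false) :
    -1 ≤ (PySem.Int.ofStr? t).getD 0 := by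
  simp only [Bool.and_eq_false_iff, Bool.not_eq_false', bne_eq_false_iff_eq] at hg
  rcases hg with hd | rfl
  · calc (-1 : Int) ≤ 0 := by norm_num
      _ ≤ _ := by
        rw [PySem.Str.strIsdigit_eq] at hd
        simpa [PySem.Int.ofStr?] using ofChars?_getD_nonneg_of_digits t.toList hd
  · decide

-- in a ≤-sorted list every element is at most the last one
lemma le_getLast_of_pairwise : ∀ (l : List Int), l.Pairwise (· ≤ ·) →
    ∀ x ∈ l, ∀ (hne : l ≠ []), x ≤ l.getLast hne := by
  intro l hp
  induction l with
  | nil => intro x hx; simp at hx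
  | cons a t ih =>
      intro x hx hne
      cases t with
      | nil => simp at hx; simp [hx]
      | cons b u =>
          rw [List.getLast_cons (by simp)]
          rw [List.pairwise_cons] at hp
          rcases List.mem_cons.1 hx with rfl | hxt
          · exact le_trans (hp.1 _ (List.getLast_mem _)) (le_refl _)
          · exact ih hp.2 x hxt (by simp)

-- the core invariant: A's loop state (the set) and B's loop state (the running max) agree
lemma loop_eq (length : Int) : ∀ (l : List String) (s : PySem.Set Int) (hi : Option Int),
    (∀ x ∈ s, -1 ≤ x) →
    (hi = none → s = []) →
    (∀ h, hi = some h → h ∈ s ∧ ∀ x ∈ s, x ≤ h) →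
    validA_loop length l s = validB_loop length l hi := by
  intro l
  induction l with
  | nil =>
      intro s hi hge h0 h1
      cases hi with
      | none =>
          rw [h0 rfl]
          simp [validA_loop, validB_loop]
      | some h =>
          obtain ⟨hmem, hmax⟩ := h1 h rfl
          have hsne : s ≠ [] := by rintro rfl; simp at hmem
          simp only [validA_loop, validB_loop]
          set ls := PySem.List.sorted s (fun x => x) false with hls
          have hlsne : ls ≠ [] := by
            rw [hls, Ne, PySem.List.sorted_eq_nil_iff]; exact hsne
          have hlen : ¬ ((s.length : Int) ≤ 0) := by
            have : 0 < s.length := List.length_pos_iff.2 hsne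
            omega
          rw [if_neg hlen]
          -- the last element of the sorted list is exactly h, the maximum
          have hlast : (PySem.List.pyGet? ls (-1)).getD 0 = h := by
            rw [PySem.List.pyGet?_neg_one, List.getLast?_eq_some_getLast (h := hlsne)]
            have hpw : ls.Pairwise (· ≤ ·) := by
              simpa using PySem.List.sorted_pairwise s (fun x => x)
            have h1' : ls.getLast hlsne ≤ h := by
              have : ls.getLast hlsne ∈ s :=
                (PySem.List.mem_sorted s (fun x => x) false _).1 (List.getLast_mem hlsne)
              exact hmax _ this
            have h2' : h ≤ ls.getLast hlsne := by
              have : h ∈ ls := (PySem.List.mem_sorted s (fun x => x) false h).2 hmem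
              exact le_getLast_of_pairwise ls hpw h this hlsne
            simpa using le_antisymm h1' h2'
          -- the first element of the sorted list is ≥ -1
          have hhead : ¬ ((PySem.List.pyGet? ls 0).getD 0 < -1) := by
            rw [PySem.List.pyGet?_zero]
            have hpos : 0 < ls.length := List.length_pos_iff.2 hlsne
            rw [List.getElem?_eq_getElem hpos]
            have : ls[0] ∈ s :=
              (PySem.List.mem_sorted s (fun x => x) false _).1 (List.getElem_mem hpos)
            have := hge _ this
            simp only [Option.getD_some]
            omega
          rw [hlast]
          by_cases hlt : h ≥ length
          · simp [hlt, show ¬ h < length by omega]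
          · rw [if_neg hlt, if_neg hhead]
            simp [show h < length by omega]
  | cons t rest ih =>
      intro s hi hge h0 h1
      simp only [validA_loop, validB_loop]
      by_cases hg : (!(PySem.Str.strIsdigit t) && t != "-1") = true
      · rw [if_pos hg, if_pos hg]
      · rw [if_neg hg, if_neg hg]
        have hgf : (!(PySem.Str.strIsdigit t) && t != "-1") = false := by
          revert hg; cases (!(PySem.Str.strIsdigit t) && t != "-1") <;> simp
        have hv : -1 ≤ (PySem.Int.ofStr? t).getD 0 := token_val_ge_neg_one t hgf
        set v := (PySem.Int.ofStr? t).getD 0 with hvdef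
        apply ih
        · intro x hx
          rcases (PySem.Set.mem_add s v x).1 hx with hxs | rfl
          · exact hge x hxs
          · exact hv
        · intro hn
          cases hi with
          | none => simp at hn
          | some h => simp at hn; split at hn <;> simp at hn
        · intro h' hh'
          cases hi with
          | none =>
              simp only [Option.some_inj] at hh'
              subst hh'
              constructor
              · exact (PySem.Set.mem_add s v v).2 (Or.inr rfl)
              · intro x hx
                rcases (PySem.Set.mem_add s v x).1 hx with hxs | rfl
                · rw [h0 rfl] at hxs; simp at hxs
                · exact le_refl _
          | some h =>
              obtain ⟨hmem, hmax⟩ := h1 h rfl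
              simp only at hh'
              by_cases hvh : v > h
              · rw [if_pos hvh, Option.some_inj] at hh'
                subst hh'
                constructor
                · exact (PySem.Set.mem_add s v v).2 (Or.inr rfl)
                · intro x hx
                  rcases (PySem.Set.mem_add s v x).1 hx with hxs | rfl
                  · exact le_trans (hmax x hxs) (le_of_lt hvh)
                  · exact le_refl _
              · rw [if_neg hvh, Option.some_inj] at hh'
                subst hh'
                constructor
                · exact (PySem.Set.mem_add s v h).2 (Or.inl hmem)
                · intro x hx
                  rcases (PySem.Set.mem_add s v x).1 hx with hxs | rfl
                  · exact hmax x hxs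
                  · omega

-- ===== VERDICT (by name: the statement is the Claim_ definition above) =====
theorem valid_indices_spec : Claim_equal_valid_indices := by
  intro indices length _
  unfold Spec_valid_indices valid_indices valid_indices_alt
  exact loop_eq length (PySem.Str.split₀ indices) PySem.Set.empty none
    (by intro x hx; simp [PySem.Set.empty] at hx)
    (fun _ => rfl)
    (by intro h hh; simp at hh)
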